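-- pv_equiv track=rewrite | github.com/ExperimenterX/PersonaRAG | server/app/eval/run_eval.py | section_is_relevant
-- ===== SOURCE A (Python) =====
-- from typing import List, Dict, Any
--
-- def normalize_section(sec: str | None) -> str | None:
--     """
--     Strip prefixes like 'resume::' or 'docs::' so labels like 'projects[0]'
--     match both 'projects[0]' and 'resume::projects[0]'.
--     """
--     if sec is None:
--         return None
--     for prefix in ("resume::", "docs::"):
--         if sec.startswith(prefix):
--             return sec[len(prefix):]
--     return sec
--
-- def section_is_relevant(section: str | None, relevant_sections: List[str]) -> bool:
--     """
--     Consider a section hit if: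
--       - exact match after normalization, or
--       - the gold label is a prefix of the normalized section, e.g.
--         'experience' matches 'experience[0]' and 'experience[1]'.
--     """
--     if not section:
--         return False
--     s_norm = normalize_section(section)
--     if not s_norm:
--         return False
--
--     for rel in relevant_sections:
--         rel_norm = normalize_section(rel)
--         if not rel_norm:
--             continue
--         if s_norm == rel_norm:
--             return True
--         # Coarse label like "experience" should match "experience[0]" etc.
--         if s_norm.startswith(rel_norm + "["):
--             return True
--     return False
-- ===== SOURCE B (Python) =====
-- from typing import List
--
-- def normalize_section(sec):
--     if sec is None:
--         return None
--     for prefix in ("resume::", "docs::"):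
--         if sec.startswith(prefix):
--             return sec[len(prefix):]
--     return sec
--
-- def section_is_relevant(section, relevant_sections: List[str]) -> bool:
--     if not section:
--         return False
--     s_norm = normalize_section(section)
--     if not s_norm:
--         return False
--     labels = set()
--     for rel in relevant_sections:
--         r = normalize_section(rel)
--         if r:
--             labels.add(r)
--     if s_norm in labels:
--         return True
--     for i, ch in enumerate(s_norm):
--         if ch == '[' and s_norm[:i] in labels:
--             return True
--     return False
-- ===== Notes on version B (the rewrite author's own statement) =====
-- stated objective: alternative
-- what changed: Instead of scanning relevant_sections and testing equality/prefix of each normalized gold label against the query, B builds a set of normalized non-empty labels once and then checks membership of the query itself and of each of its bracket-prefixes (s_norm[:i] for every '[' position i).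
import Mathlib
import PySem

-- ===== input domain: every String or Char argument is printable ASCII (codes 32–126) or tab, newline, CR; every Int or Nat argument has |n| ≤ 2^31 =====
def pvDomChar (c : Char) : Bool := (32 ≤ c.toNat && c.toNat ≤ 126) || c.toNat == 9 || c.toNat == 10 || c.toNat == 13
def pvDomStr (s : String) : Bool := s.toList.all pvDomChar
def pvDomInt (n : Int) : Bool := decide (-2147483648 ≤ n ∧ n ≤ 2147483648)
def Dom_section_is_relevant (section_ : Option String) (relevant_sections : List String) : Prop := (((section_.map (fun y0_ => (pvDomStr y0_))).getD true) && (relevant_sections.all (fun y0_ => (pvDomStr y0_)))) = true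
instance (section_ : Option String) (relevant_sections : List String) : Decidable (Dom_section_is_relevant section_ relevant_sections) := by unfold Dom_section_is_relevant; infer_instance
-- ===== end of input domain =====

-- B replaces A's scan of relevant_sections (equality / prefix test per label) by a set of
-- normalized labels queried at the section itself and at each of its '['-prefixes (alternative decomposition).

-- ===== PORT A =====
-- shared helper: normalize_section
def normSec (sec : Option String) : Option String :=
  match sec with
  | none => none
  | some s =>
    if PySem.Str.startswith s "resume::" then some (PySem.Str.slice s (some 8) none)
    else if PySem.Str.startswith s "docs::" then some (PySem.Str.slice s (some 6) none)
    else some s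

-- A's for-loop over relevant_sections
def relScan (sn : String) : List String → Bool
  | [] => false
  | rel :: rest =>
    match normSec (some rel) with
    | none => relScan sn rest
    | some rn =>
      if rn = "" then relScan sn rest
      else if sn = rn then true
      else if PySem.Str.startswith sn (rn ++ "[") then true
      else relScan sn rest

def section_is_relevant (section_ : Option String) (relevant_sections : List String) : Bool :=
  match section_ with
  | none => false
  | some s =>
    if s = "" then false
    else
      match normSec (some s) with
      | none => false
      | some sn => if sn = "" then false else relScan sn relevant_sections

-- ===== PORT B =====
-- B's first loop: the set of normalized, non-empty gold labels
def buildLabels (rels : List String) : PySem.Set String :=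
  rels.foldl (fun acc rel =>
    match normSec (some rel) with
    | none => acc
    | some r => if r = "" then acc else PySem.Set.add acc r) PySem.Set.empty

-- B's second loop: for i, ch in enumerate(s_norm): ch == '[' and s_norm[:i] in labels
def bracketScan (labels : PySem.Set String) (sn : String) : List (Int × Char) → Bool
  | [] => false
  | (i, ch) :: rest =>
    if ch = '[' && PySem.Set.contains labels (PySem.Str.slice sn none (some i)) then true
    else bracketScan labels sn rest

def section_is_relevant_alt (section_ : Option String) (relevant_sections : List String) : Bool :=
  match section_ with
  | none => false
  | some s =>
    if s = "" then false
    else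
      match normSec (some s) with
      | none => false
      | some sn =>
        if sn = "" then false
        else
          let labels := buildLabels relevant_sections
          if PySem.Set.contains labels sn then true
          else bracketScan labels sn (PySem.List.enumerate sn.toList)

-- ===== PRECONDITION & SPEC =====
def Spec_section_is_relevant (section_ : Option String) (relevant_sections : List String) (out : Bool) : Prop := out = section_is_relevant_alt section_ relevant_sections
instance (section_ : Option String) (relevant_sections : List String) (out : Bool) : Decidable (Spec_section_is_relevant section_ relevant_sections out) := by unfold Spec_section_is_relevant; infer_instance

-- ===== CLAIM (what is proved, stated in full; the proofs are below) =====
def Claim_equal_section_is_relevant : Prop := ∀ (section_ : Option String) (relevant_sections : List String), Dom_section_is_relevant section_ relevant_sections → Spec_section_is_relevant section_ relevant_sections (section_is_relevant section_ relevant_sections)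

-- ===== LEMMAS AND PROOFS =====

-- characterization of A's loop
theorem relScan_iff (sn : String) (rels : List String) :
    relScan sn rels = true ↔
      ∃ rel ∈ rels, ∃ rn, normSec (some rel) = some rn ∧ rn ≠ "" ∧
        (sn = rn ∨ PySem.Str.startswith sn (rn ++ "[") = true) := by
  induction rels with
  | nil => simp [relScan]
  | cons rel rest ih =>
    simp only [relScan]
    cases h : normSec (some rel) with
    | none => simp [ih, h]
    | some rn =>
      rw [show (match some rn with
        | none => relScan sn rest
        | some rn =>
          if rn = "" then relScan sn rest
          else if sn = rn then true
          else if PySem.Str.startswith sn (rn ++ "[") = true then true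
          else relScan sn rest)
          = (if rn = "" then relScan sn rest
             else if sn = rn then true
             else if PySem.Str.startswith sn (rn ++ "[") = true then true
             else relScan sn rest) from rfl]
      by_cases he : rn = ""
      · subst he; rw [if_pos rfl, ih]
        constructor
        · rintro ⟨r, hr, rn', h1, h2, h3⟩; exact ⟨r, List.mem_cons_of_mem _ hr, rn', h1, h2, h3⟩
        · rintro ⟨r, hr, rn', h1, h2, h3⟩
          rcases List.mem_cons.mp hr with hr | hr
          · subst hr; rw [h] at h1; cases h1; exact absurd rfl h2
          · exact ⟨r, hr, rn', h1, h2, h3⟩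
      · rw [if_neg he]
        by_cases heq : sn = rn
        · rw [if_pos heq]
          constructor
          · intro _; exact ⟨rel, List.mem_cons_self .., rn, h, he, Or.inl heq⟩
          · intro _; rfl
        · rw [if_neg heq]
          by_cases hsw : PySem.Str.startswith sn (rn ++ "[") = true
          · rw [if_pos hsw]
            constructor
            · intro _; exact ⟨rel, List.mem_cons_self .., rn, h, he, Or.inr hsw⟩
            · intro _; rfl
          · rw [if_neg hsw, ih]
            constructor
            · rintro ⟨r, hr, rn', h1, h2, h3⟩; exact ⟨r, List.mem_cons_of_mem _ hr, rn', h1, h2, h3⟩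
            · rintro ⟨r, hr, rn', h1, h2, h3⟩
              rcases List.mem_cons.mp hr with hr | hr
              · subst hr; rw [h] at h1; cases h1
                rcases h3 with h3 | h3
                · exact absurd h3 heq
                · exact absurd h3 hsw
              · exact ⟨r, hr, rn', h1, h2, h3⟩

-- membership in B's label set
theorem mem_buildLabels_aux (rels : List String) (acc : PySem.Set String) (x : String) :
    x ∈ rels.foldl (fun acc rel =>
        match normSec (some rel) with
        | none => acc
        | some r => if r = "" then acc else PySem.Set.add acc r) acc ↔
      x ∈ acc ∨ ∃ rel ∈ rels, normSec (some rel) = some x ∧ x ≠ "" := by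
  induction rels generalizing acc with
  | nil => simp
  | cons rel rest ih =>
    simp only [List.foldl_cons]
    cases h : normSec (some rel) with
    | none =>
      rw [ih]
      constructor
      · rintro (hx | ⟨r, hr, h1, h2⟩)
        · exact Or.inl hx
        · exact Or.inr ⟨r, List.mem_cons_of_mem _ hr, h1, h2⟩
      · rintro (hx | ⟨r, hr, h1, h2⟩)
        · exact Or.inl hx
        · rcases List.mem_cons.mp hr with hr | hr
          · subst hr; rw [h] at h1; cases h1
          · exact Or.inr ⟨r, hr, h1, h2⟩
    | some rn =>
      rw [show (match some rn with
        | none => acc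
        | some r => if r = "" then acc else PySem.Set.add acc r)
          = if rn = "" then acc else PySem.Set.add acc rn from rfl]
      by_cases he : rn = ""
      · rw [if_pos he, ih]
        subst he
        constructor
        · rintro (hx | ⟨r, hr, h1, h2⟩)
          · exact Or.inl hx
          · exact Or.inr ⟨r, List.mem_cons_of_mem _ hr, h1, h2⟩
        · rintro (hx | ⟨r, hr, h1, h2⟩)
          · exact Or.inl hx
          · rcases List.mem_cons.mp hr with hr | hr
            · subst hr; rw [h] at h1; cases h1; exact absurd rfl h2
            · exact Or.inr ⟨r, hr, h1, h2⟩
      · rw [if_neg he, ih, PySem.Set.mem_add]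
        constructor
        · rintro ((hx | hx) | ⟨r, hr, h1, h2⟩)
          · exact Or.inl hx
          · subst hx; exact Or.inr ⟨rel, List.mem_cons_self .., h, he⟩
          · exact Or.inr ⟨r, List.mem_cons_of_mem _ hr, h1, h2⟩
        · rintro (hx | ⟨r, hr, h1, h2⟩)
          · exact Or.inl (Or.inl hx)
          · rcases List.mem_cons.mp hr with hr | hr
            · subst hr; rw [h] at h1; cases h1; exact Or.inl (Or.inr rfl)
            · exact Or.inr ⟨r, hr, h1, h2⟩

theorem mem_buildLabels (rels : List String) (x : String) :
    x ∈ buildLabels rels ↔ ∃ rel ∈ rels, normSec (some rel) = some x ∧ x ≠ "" := by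
  unfold buildLabels
  rw [mem_buildLabels_aux]
  simp [PySem.Set.empty]

-- characterization of B's bracket loop
theorem bracketScan_iff (labels : PySem.Set String) (sn : String) (ps : List (Int × Char)) :
    bracketScan labels sn ps = true ↔
      ∃ p ∈ ps, p.2 = '[' ∧
        PySem.Set.contains labels (PySem.Str.slice sn none (some p.1)) = true := by
  induction ps with
  | nil =>
    show false = true ↔ _
    simp
  | cons p rest ih =>
    obtain ⟨i, ch⟩ := p
    show (if (decide (ch = '[') && PySem.Set.contains labels (PySem.Str.slice sn none (some i))) = true
        then true else bracketScan labels sn rest) = true ↔ _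
    by_cases h : (decide (ch = '[') && PySem.Set.contains labels (PySem.Str.slice sn none (some i))) = true
    · rw [if_pos h]
      rcases Bool.and_eq_true_iff.mp h with ⟨h1, h2⟩
      constructor
      · intro _; exact ⟨(i, ch), List.mem_cons_self .., of_decide_eq_true h1, h2⟩
      · intro _; rfl
    · rw [if_neg h, ih]
      constructor
      · rintro ⟨q, hq, h1, h2⟩; exact ⟨q, List.mem_cons_of_mem _ hq, h1, h2⟩
      · rintro ⟨q, hq, h1, h2⟩
        rcases List.mem_cons.mp hq with hq | hq
        · subst hq
          exact absurd (Bool.and_eq_true_iff.mpr ⟨decide_eq_true h1, h2⟩) h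
        · exact ⟨q, hq, h1, h2⟩

-- the string slice s[:k] as take
theorem slice_take (sn : String) (k : Nat) :
    (PySem.Str.slice sn none (some (k : Int))).toList = sn.toList.take k := by
  simp [PySem.Str.toList_slice, PySem.List.slice_to_natCast]

theorem string_eq_iff_toList (s t : String) : s = t ↔ s.toList = t.toList :=
  ⟨fun h => h ▸ rfl, fun h => String.toList_inj.mp h⟩

-- startswith (rn ++ "[") in terms of a '[' position and a take-prefix
theorem startswith_bracket_iff (sn rn : String) :
    PySem.Str.startswith sn (rn ++ "[") = true ↔
      ∃ k, ∃ h : k < sn.toList.length, sn.toList[k] = '[' ∧ sn.toList.take k = rn.toList := by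
  rw [show PySem.Str.startswith sn (rn ++ "[") = PySem.Chars.startswith sn.toList (rn ++ "[").toList from (PySem.Str.startswith_eq ..).symm]
  rw [PySem.Chars.startswith_iff]
  have hcat : (rn ++ "[").toList = rn.toList ++ ['['] := by simp
  rw [hcat]
  constructor
  · intro hpre
    have hk : rn.toList.length < sn.toList.length := by
      have := hpre.length_le
      simp only [List.length_append, List.length_cons, List.length_nil] at this
      omega
    have htake : rn.toList ++ ['['] = sn.toList.take (rn.toList.length + 1) := by
      have := List.prefix_iff_eq_take.mp hpre
      simpa using this
    have h2 : sn.toList.take (rn.toList.length + 1)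
        = sn.toList.take rn.toList.length ++ [sn.toList[rn.toList.length]] := by
      rw [List.take_add_one, List.getElem?_eq_getElem hk]
      rfl
    rw [h2] at htake
    have hlen : rn.toList.length = (sn.toList.take rn.toList.length).length := by
      rw [List.length_take]; omega
    rcases List.append_inj htake hlen with ⟨h3, h4⟩
    exact ⟨rn.toList.length, hk, ((List.cons_eq_cons.mp h4).1).symm, h3.symm⟩
  · rintro ⟨k, hk, hch, htk⟩
    have h1 : rn.toList ++ ['['] = sn.toList.take (k + 1) := by
      rw [List.take_add_one, ← htk, List.getElem?_eq_getElem hk, hch]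
      rfl
    rw [h1]
    exact List.take_prefix _ _

-- the core equality of the two loops
theorem loops_eq (sn : String) (rels : List String) :
    relScan sn rels =
      (PySem.Set.contains (buildLabels rels) sn ||
        bracketScan (buildLabels rels) sn (PySem.List.enumerate sn.toList)) := by
  have hiff :
      relScan sn rels = true ↔
        (PySem.Set.contains (buildLabels rels) sn ||
          bracketScan (buildLabels rels) sn (PySem.List.enumerate sn.toList)) = true := by
    rw [relScan_iff, Bool.or_eq_true, PySem.Set.contains_iff, mem_buildLabels,
      bracketScan_iff]
    constructor
    · rintro ⟨rel, hrel, rn, h1, h2, h3 | h3⟩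
      · exact Or.inl ⟨rel, hrel, h3 ▸ h1, h3 ▸ h2⟩
      · right
        rcases (startswith_bracket_iff sn rn).mp h3 with ⟨k, hk, hch, htk⟩
        refine ⟨((k : Int), sn.toList[k]), ?_, by simpa using hch, ?_⟩
        · rw [PySem.List.mem_enumerate_iff]
          exact ⟨k, hk, by simp⟩
        · rw [PySem.Set.contains_iff, mem_buildLabels]
          refine ⟨rel, hrel, ?_, ?_⟩
          · rw [h1]
            congr 1
            rw [string_eq_iff_toList, slice_take, htk]
          · intro hempty
            apply h2
            rw [string_eq_iff_toList]
            rw [string_eq_iff_toList, slice_take] at hempty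
            rw [← htk]
            exact hempty
    · rintro (⟨rel, hrel, h1, h2⟩ | ⟨p, hp, hch, hc⟩)
      · exact ⟨rel, hrel, sn, h1, h2, Or.inl rfl⟩
      · rw [PySem.List.mem_enumerate_iff] at hp
        rcases hp with ⟨k, hk, rfl⟩
        simp only [zero_add] at hch hc
        rw [PySem.Set.contains_iff, mem_buildLabels] at hc
        rcases hc with ⟨rel, hrel, h1, h2⟩
        refine ⟨rel, hrel, _, h1, h2, Or.inr ?_⟩
        rw [startswith_bracket_iff]
        exact ⟨k, hk, hch, (slice_take sn k).symm⟩
  cases hA : relScan sn rels <;>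
    cases hB : (PySem.Set.contains (buildLabels rels) sn ||
        bracketScan (buildLabels rels) sn (PySem.List.enumerate sn.toList)) <;>
    simp_all

-- ===== VERDICT (by name: the statement is the Claim_ definition above) =====
theorem section_is_relevant_spec : Claim_equal_section_is_relevant := by
  intro sec rels _
  show section_is_relevant sec rels = section_is_relevant_alt sec rels
  cases sec with
  | none => rfl
  | some s =>
    simp only [section_is_relevant, section_is_relevant_alt]
    by_cases hs : s = ""
    · simp [hs]
    · rw [if_neg hs, if_neg hs]
      cases h : normSec (some s) with
      | none => rfl
      | some sn =>
        show (if sn = "" then false else relScan sn rels)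
          = (if sn = "" then false else
              if PySem.Set.contains (buildLabels rels) sn = true then true
              else bracketScan (buildLabels rels) sn (PySem.List.enumerate sn.toList))
        by_cases he : sn = ""
        · rw [if_pos he, if_pos he]
        · rw [if_neg he, if_neg he, loops_eq]
          cases hc : PySem.Set.contains (buildLabels rels) sn <;> simp
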